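-- pv_equiv track=rewrite | github.com/Master-Kiwi/EV3_cubesolver_2x2x2 | src/array_funcs.py | facemap_to_ascii
-- ===== SOURCE A (Python) =====
-- def facemap_to_ascii(flat_facemap):
--     fm_ascii = ""
--     #values defined in Rubikscube_2x2x2.py
--     rcube_col_idx = {
--     "white"     : 0,
--     "yellow"    : 1,
--     "orange"    : 2,
--     "red"       : 3,
--     "blue"      : 4,
--     "green"     : 5,
--     }
--
--     for item, cnt in zip(flat_facemap, range(len(flat_facemap))):
--         if((cnt % 4) == 0) & (cnt != 0): fm_ascii += "-"
--         if(item == rcube_col_idx["white"]): fm_ascii += "W"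
--         if(item == rcube_col_idx["yellow"]): fm_ascii += "Y"
--         if(item == rcube_col_idx["orange"]): fm_ascii += "O"
--         if(item == rcube_col_idx["red"]): fm_ascii += "R"
--         if(item == rcube_col_idx["blue"]): fm_ascii += "B"
--         if(item == rcube_col_idx["green"]): fm_ascii += "G"
--
--
--     return (fm_ascii)
-- ===== SOURCE B (Python) =====
-- def facemap_to_ascii(flat_facemap):
--     cmap = {0: "W", 1: "Y", 2: "O", 3: "R", 4: "B", 5: "G"}
--     blocks = []
--     for i in range(0, len(flat_facemap), 4):
--         blocks.append("".join(cmap[x] for x in flat_facemap[i:i + 4] if x in cmap))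
--     return "-".join(blocks)
-- ===== Notes on version B (the rewrite author's own statement) =====
-- stated objective: simpler
-- what changed: Replaces the indexed loop with its six sequential equality tests and position-modulus separator logic by a dict lookup over 4-element slices whose block strings are joined with '-'.
import Mathlib
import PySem

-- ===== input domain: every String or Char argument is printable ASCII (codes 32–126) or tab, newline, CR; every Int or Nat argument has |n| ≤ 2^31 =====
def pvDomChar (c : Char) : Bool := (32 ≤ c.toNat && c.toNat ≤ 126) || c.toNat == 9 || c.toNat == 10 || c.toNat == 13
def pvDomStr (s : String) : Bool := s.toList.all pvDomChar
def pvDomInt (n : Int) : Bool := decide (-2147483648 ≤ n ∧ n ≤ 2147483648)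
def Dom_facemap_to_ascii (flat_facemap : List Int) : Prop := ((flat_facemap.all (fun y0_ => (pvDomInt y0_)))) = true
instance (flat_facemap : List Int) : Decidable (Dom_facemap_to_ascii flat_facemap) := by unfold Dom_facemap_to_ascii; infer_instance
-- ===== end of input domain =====

-- B replaces A's indexed loop of six equality tests and modulus-based separator logic by a
-- dict lookup over 4-element slices joined with '-' (objective: simpler).

-- ===== PORT A =====
-- the six sequential 'if item == …: fm_ascii += …' tests of the loop body
def faStep (acc : List Char) (item : Int) : List Char :=
  let acc := if item = 0 then acc ++ ['W'] else acc
  let acc := if item = 1 then acc ++ ['Y'] else acc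
  let acc := if item = 2 then acc ++ ['O'] else acc
  let acc := if item = 3 then acc ++ ['R'] else acc
  let acc := if item = 4 then acc ++ ['B'] else acc
  let acc := if item = 5 then acc ++ ['G'] else acc
  acc

-- the 'for item, cnt in zip(flat_facemap, range(len(flat_facemap)))' loop
def faGo : List Int → Nat → List Char → List Char
  | [], _, acc => acc
  | item :: rest, cnt, acc =>
      faGo rest (cnt + 1)
        (faStep (if cnt % 4 = 0 ∧ cnt ≠ 0 then acc ++ ['-'] else acc) item)

def facemap_to_ascii (flat_facemap : List Int) : String :=
  String.ofList (faGo flat_facemap 0 [])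

-- ===== PORT B =====
-- cmap = {0:"W",1:"Y",2:"O",3:"R",4:"B",5:"G"} as a lookup
def cmapChar? (x : Int) : Option Char :=
  if x = 0 then some 'W' else if x = 1 then some 'Y' else if x = 2 then some 'O'
  else if x = 3 then some 'R' else if x = 4 then some 'B' else if x = 5 then some 'G'
  else none

-- the slices flat_facemap[i:i+4] for i in range(0, len, 4)
def chunks4 : List Int → List (List Int)
  | [] => []
  | x :: xs => (x :: xs.take 3) :: chunks4 (xs.drop 3)
termination_by l => l.length
decreasing_by simp

-- "".join(cmap[x] for x in block if x in cmap)
def blockChars (b : List Int) : List Char := b.filterMap cmapChar?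

def facemap_to_ascii_alt (flat_facemap : List Int) : String :=
  String.ofList (PySem.Chars.join ['-'] ((chunks4 flat_facemap).map blockChars))

-- ===== PRECONDITION & SPEC =====
def Spec_facemap_to_ascii (flat_facemap : List Int) (out : String) : Prop := out = facemap_to_ascii_alt flat_facemap
instance (flat_facemap : List Int) (out : String) : Decidable (Spec_facemap_to_ascii flat_facemap out) := by unfold Spec_facemap_to_ascii; infer_instance

-- ===== CLAIM (what is proved, stated in full; the proofs are below) =====
def Claim_equal_facemap_to_ascii : Prop := ∀ (flat_facemap : List Int), Dom_facemap_to_ascii flat_facemap → Spec_facemap_to_ascii flat_facemap (facemap_to_ascii flat_facemap)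

-- ===== LEMMAS AND PROOFS =====

lemma faStep_eq (acc : List Char) (x : Int) :
    faStep acc x = acc ++ (cmapChar? x).toList := by
  unfold faStep cmapChar?
  split_ifs <;> simp_all

lemma chunks4_nil : chunks4 [] = [] := by simp [chunks4]

lemma chunks4_cons (x : Int) (xs : List Int) :
    chunks4 (x :: xs) = (x :: xs.take 3) :: chunks4 (xs.drop 3) := by simp [chunks4]

lemma blockChars_cons (a : Int) (b : List Int) :
    blockChars (a :: b) = (cmapChar? a).toList ++ blockChars b := by
  cases h : cmapChar? a <;> simp [blockChars, h]

lemma blockChars_nil : blockChars [] = [] := rfl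

-- one block of four indices: from a block boundary, the loop emits the separator (unless at
-- index 0) and then the block's characters, landing on the next boundary
lemma faGo_block (x : Int) (xs : List Int) (cnt : Nat) (acc : List Char) (h : cnt % 4 = 0) :
    faGo (x :: xs) cnt acc =
      faGo (xs.drop 3) (cnt + 4)
        (acc ++ (if cnt = 0 then [] else ['-']) ++ blockChars (x :: xs.take 3)) := by
  have h1 : (cnt + 1) % 4 ≠ 0 := by omega
  have h2 : (cnt + 1 + 1) % 4 ≠ 0 := by omega
  have h3 : (cnt + 1 + 1 + 1) % 4 ≠ 0 := by omega
  have hsep : (if cnt % 4 = 0 ∧ cnt ≠ 0 then acc ++ ['-'] else acc)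
      = acc ++ (if cnt = 0 then [] else ['-']) := by
    by_cases hc : cnt = 0 <;> simp [hc, h]
  match xs with
  | [] =>
      simp [faGo, faStep_eq, hsep, blockChars_cons, blockChars_nil]
  | [b] =>
      simp [faGo, faStep_eq, hsep, h1, blockChars_cons, blockChars_nil]
  | [b, c] =>
      simp [faGo, faStep_eq, hsep, h1, h2, blockChars_cons, blockChars_nil]
  | b :: c :: d :: rest =>
      simp [faGo, faStep_eq, hsep, h1, h2, h3, blockChars_cons, blockChars_nil]

-- main invariant: from any 4-aligned position, the loop appends '-' (unless at position 0 or
-- out of input) followed by B's join of the remaining blocks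
lemma faGo_eq_join : ∀ (n : Nat) (l : List Int) (cnt : Nat) (acc : List Char),
    l.length ≤ n → cnt % 4 = 0 →
    faGo l cnt acc =
      acc ++ (if cnt = 0 ∨ l = [] then [] else ['-']) ++
        PySem.Chars.join ['-'] ((chunks4 l).map blockChars) := by
  intro n
  induction n with
  | zero =>
      intro l cnt acc hl _
      have : l = [] := by cases l <;> simp_all
      subst this
      simp [faGo, chunks4_nil, PySem.Chars.join_nil]
  | succ n ih =>
      intro l cnt acc hl hm
      match l with
      | [] => simp [faGo, chunks4_nil, PySem.Chars.join_nil]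
      | x :: xs =>
          rw [faGo_block x xs cnt acc hm]
          have hlen : (xs.drop 3).length ≤ n := by
            simp at hl ⊢; omega
          rw [ih (xs.drop 3) (cnt + 4) _ hlen (by omega), chunks4_cons]
          rcases hd : xs.drop 3 with _ | ⟨y, ys⟩
          · rw [chunks4_nil]
            by_cases hc : cnt = 0 <;>
              simp [hc, PySem.Chars.join_singleton, PySem.Chars.join_nil, List.append_assoc]
          · rw [chunks4_cons]
            simp only [List.map_cons, PySem.Chars.join_cons_cons]
            by_cases hc : cnt = 0 <;> simp [hc, List.append_assoc]

-- ===== VERDICT (by name: the statement is the Claim_ definition above) =====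
theorem facemap_to_ascii_spec : Claim_equal_facemap_to_ascii := by
  intro l _
  unfold Spec_facemap_to_ascii facemap_to_ascii facemap_to_ascii_alt
  rw [faGo_eq_join l.length l 0 [] le_rfl rfl]
  simp
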